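-- pv_equiv track=rewrite | github.com/ziuge/programmers | 프린터.py | solution
-- ===== SOURCE A (Python) =====
-- def solution(priorities, location):
--
--     answer = 0
--     Q = list(priorities)
--     L = [i for i in range(len(Q))]
--
--     while Q:
--         x = Q.pop(0)
--         l = L.pop(0)
--         if not Q:
--             answer += 1
--             break
--         elif x >= max(Q):
--             answer += 1
--             if l == location:
--                 break
--         else:
--             Q.append(x)
--             L.append(l)
--
--     return answer
-- ===== SOURCE B (Python) =====
-- def solution(priorities, location):
--     # Jump straight to the first maximum each printing round instead of
--     # rotating the queue one element at a time with a max rescan per step.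
--     q = list(priorities)
--     lab = list(range(len(q)))
--     count = 0
--     while q:
--         m = q.index(max(q))
--         count += 1
--         if lab[m] == location:
--             return count
--         q = q[m + 1:] + q[:m]
--         lab = lab[m + 1:] + lab[:m]
--     return count
-- ===== Notes on version B (the rewrite author's own statement) =====
-- stated objective: faster
-- what changed: B jumps straight to the first maximum each printing round (one max/index scan per printed job, removing the element-by-element requeue loop) instead of A's one-step rotation with a max rescan on every single queue step.
import Mathlib
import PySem

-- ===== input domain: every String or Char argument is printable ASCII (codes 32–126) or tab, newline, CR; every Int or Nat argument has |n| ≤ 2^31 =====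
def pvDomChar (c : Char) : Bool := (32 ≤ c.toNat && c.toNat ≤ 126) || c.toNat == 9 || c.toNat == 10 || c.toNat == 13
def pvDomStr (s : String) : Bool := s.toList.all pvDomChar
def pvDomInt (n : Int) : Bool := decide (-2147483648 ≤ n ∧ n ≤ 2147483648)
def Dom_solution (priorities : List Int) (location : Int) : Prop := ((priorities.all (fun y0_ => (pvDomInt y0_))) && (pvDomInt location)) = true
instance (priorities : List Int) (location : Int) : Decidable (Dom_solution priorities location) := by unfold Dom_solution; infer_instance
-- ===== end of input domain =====

-- B replaces A's one-step rotation simulation (a max rescan on every single queue step)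
-- by jumping straight to the first maximum each printing round; return values are equal
-- on every input (both functions are total).

-- ===== PORT A =====
-- helpers for A's termination measure: value and position of the first maximum of the queue
def pvMval (Q : List Int) : Int := Q.foldl max (Q.headD 0)
def pvFm (Q : List Int) : Nat := (PySem.List.index? Q (pvMval Q)).getD 0

theorem pvMval_cons (x : Int) (t : List Int) : pvMval (x :: t) = t.foldl max x := by
  show t.foldl max (max x x) = t.foldl max x
  rw [max_self]

theorem pvFoldl_max_init (t : List Int) (a b : Int) :
    t.foldl max (max a b) = max a (t.foldl max b) := by
  induction t generalizing b with
  | nil => rfl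
  | cons y t ih => simp only [List.foldl_cons, max_assoc]; exact ih (max b y)

theorem pvMval_mem (x : Int) (t : List Int) : pvMval (x :: t) ∈ x :: t := by
  rw [pvMval_cons]
  rcases PySem.List.foldl_max_mem t x with h1 | h1
  · simp [h1]
  · simp [h1]

theorem pvMval_cons_cons_of_lt (x y : Int) (t : List Int) (h : x < t.foldl max y) :
    pvMval (x :: y :: t) = pvMval (y :: t) := by
  rw [pvMval_cons, pvMval_cons, List.foldl_cons, pvFoldl_max_init t x y]
  omega

theorem pvMval_append_of_lt (x y : Int) (t : List Int) (h : x < t.foldl max y) :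
    pvMval ((y :: t) ++ [x]) = pvMval (y :: t) := by
  rw [pvMval_cons]
  show (t ++ [x]).foldl max (max y y) = t.foldl max y
  rw [max_self, List.foldl_append]
  simp only [List.foldl_cons, List.foldl_nil]
  omega

theorem pvFm_cons_cons_of_lt (x y : Int) (t : List Int) (h : x < t.foldl max y) :
    pvFm (x :: y :: t) = pvFm (y :: t) + 1 := by
  have hmem := pvMval_mem y t
  rcases Option.isSome_iff_exists.1 ((PySem.List.index?_isSome_iff _ _).2 hmem) with ⟨k, hk⟩
  have hne : x ≠ pvMval (y :: t) := by
    rw [pvMval_cons]; omega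
  rw [pvFm, pvMval_cons_cons_of_lt x y t h, PySem.List.index?_cons_of_ne _ hne, hk]
  rw [pvFm, hk]
  rfl

theorem pvFm_append_of_lt (x y : Int) (t : List Int) (h : x < t.foldl max y) :
    pvFm ((y :: t) ++ [x]) = pvFm (y :: t) := by
  rw [pvFm, pvMval_append_of_lt x y t h,
    PySem.List.index?_append_of_mem [x] (pvMval_mem y t), pvFm]

theorem pvFm_rot_lt (x y : Int) (t : List Int) (h : x < t.foldl max y) :
    pvFm ((y :: t) ++ [x]) < pvFm (x :: y :: t) := by
  rw [pvFm_append_of_lt x y t h, pvFm_cons_cons_of_lt x y t h]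
  omega

def solutionLoop (Q L : List Int) (location answer : Int) : Int :=
  match Q, L with
  | [], _ => answer
  | x :: Q', L0 =>
      let l := L0.headD 0
      let L' := L0.tail
      match Q' with
      | [] => answer + 1
      | y :: t =>
        if (PySem.List.max? (y :: t) (fun v => v)).getD 0 ≤ x then
          if l = location then answer + 1
          else solutionLoop (y :: t) L' location (answer + 1)
        else solutionLoop ((y :: t) ++ [x]) (L' ++ [l]) location answer
termination_by (Q.length, pvFm Q)
decreasing_by
  · exact Prod.Lex.left _ _ (by simp)
  · apply Prod.Lex.right'
    · simp
    · apply pvFm_rot_lt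
      rename_i hcond
      rw [PySem.List.max?_id_cons] at hcond
      simpa using hcond

def solution (priorities : List Int) (location : Int) : Int :=
  solutionLoop priorities (PySem.List.pyRange 0 (PySem.List.len priorities) 1) location 0

-- ===== PORT B =====
theorem pvFm_lt_length (x : Int) (t : List Int) : pvFm (x :: t) < (x :: t).length := by
  rcases Option.isSome_iff_exists.1 ((PySem.List.index?_isSome_iff _ _).2 (pvMval_mem x t)) with ⟨k, hk⟩
  obtain ⟨hlt, -⟩ := PySem.List.getElem_of_index?_eq_some hk
  rw [pvFm, hk]
  simpa using hlt

theorem pvIdxMax_eq_pvFm (x : Int) (t : List Int) :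
    ((PySem.List.index? (x :: t) ((PySem.List.max? (x :: t) (fun v => v)).getD 0)).getD 0) = pvFm (x :: t) := by
  rw [PySem.List.max?_id_cons, Option.getD_some, pvFm, pvMval_cons]

theorem pvRotLen_lt (q : List Int) (m : Nat) (hm : m < q.length) :
    (PySem.List.slice q (some ((m : Int) + 1)) none ++
      PySem.List.slice q none (some (m : Int))).length < q.length := by
  have h1 : ((m : Int) + 1) = ((m + 1 : Nat) : Int) := by push_cast; ring
  rw [h1, PySem.List.slice_from_natCast, PySem.List.slice_to_natCast]
  simp
  omega

def solutionAltLoop (q lab : List Int) (location count : Int) : Int :=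
  match q with
  | [] => count
  | x :: t =>
      let mx := (PySem.List.max? (x :: t) (fun v => v)).getD 0
      let m : Nat := (PySem.List.index? (x :: t) mx).getD 0
      if lab.getD m 0 = location then count + 1
      else
        solutionAltLoop
          (PySem.List.slice (x :: t) (some ((m : Int) + 1)) none ++
           PySem.List.slice (x :: t) none (some (m : Int)))
          (PySem.List.slice lab (some ((m : Int) + 1)) none ++
           PySem.List.slice lab none (some (m : Int)))
          location (count + 1)
termination_by q.length
decreasing_by
  exact pvRotLen_lt _ _ (pvIdxMax_eq_pvFm x t ▸ pvFm_lt_length x t)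

def solution_alt (priorities : List Int) (location : Int) : Int :=
  solutionAltLoop priorities (PySem.List.pyRange 0 (PySem.List.len priorities) 1) location 0

-- ===== PRECONDITION & SPEC =====
def Spec_solution (priorities : List Int) (location : Int) (out : Int) : Prop := out = solution_alt priorities location
instance (priorities : List Int) (location : Int) (out : Int) : Decidable (Spec_solution priorities location out) := by unfold Spec_solution; infer_instance

-- ===== CLAIM (what is proved, stated in full; the proofs are below) =====
def Claim_equal_solution : Prop := ∀ (priorities : List Int) (location : Int), Dom_solution priorities location → Spec_solution priorities location (solution priorities location)

-- ===== LEMMAS AND PROOFS =====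

-- the queue after one printing round: everything after the first maximum, then everything before it
def pvRot (m : Nat) (xs : List Int) : List Int := xs.drop (m + 1) ++ xs.take m

theorem pvFm_cons_cons_of_le (x y : Int) (t : List Int) (h : t.foldl max y ≤ x) :
    pvFm (x :: y :: t) = 0 := by
  have hx : pvMval (x :: y :: t) = x := by
    rw [pvMval_cons, List.foldl_cons, pvFoldl_max_init t x y]
    omega
  rw [pvFm, hx, PySem.List.index?_cons_self]
  rfl

theorem pvRot_append (j : Nat) (a : Int) (xs : List Int) (h : j + 1 ≤ xs.length) :
    pvRot j (xs ++ [a]) = pvRot (j + 1) (a :: xs) := by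
  unfold pvRot
  rw [List.drop_append_of_le_length h, List.take_append_of_le_length (by omega)]
  simp [List.append_assoc]

theorem pvRot_length (m : Nat) (xs : List Int) (h : m < xs.length) :
    (pvRot m xs).length = xs.length - 1 := by
  unfold pvRot
  simp
  omega

-- A's loop rotates the front to the first maximum, prints it, and repeats
theorem loopA_rot (Q L : List Int) (loc ans : Int)
    (hlen : Q.length = L.length) (hne : Q ≠ []) :
    solutionLoop Q L loc ans =
      if Q.length = 1 then ans + 1
      else if L.getD (pvFm Q) 0 = loc then ans + 1
      else solutionLoop (pvRot (pvFm Q) Q) (pvRot (pvFm Q) L) loc (ans + 1) := by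
  match Q, L, hlen with
  | [x], L0, hlen =>
    simp [solutionLoop]
  | x :: y :: t, L0, hlen =>
    obtain ⟨l0, L1, rfl⟩ : ∃ l0 L1, L0 = l0 :: L1 := by
      cases L0 with
      | nil => simp at hlen
      | cons a b => exact ⟨a, b, rfl⟩
    rw [solutionLoop]
    simp only [PySem.List.max?_id_cons, Option.getD_some, List.headD_cons, List.tail_cons]
    by_cases hx : t.foldl max y ≤ x
    · have h1 : ¬((x :: y :: t).length = 1) := by simp
      rw [if_pos hx, pvFm_cons_cons_of_le x y t hx, if_neg h1, List.getD_cons_zero]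
      by_cases hl : l0 = loc
      · rw [if_pos hl, if_pos hl]
      · rw [if_neg hl, if_neg hl]
        simp [pvRot]
    · rw [if_neg hx]
      replace hx : x < t.foldl max y := by omega
      have hlen' : ((y :: t) ++ [x]).length = (L1 ++ [l0]).length := by
        simp at hlen ⊢; omega
      have hfj : pvFm ((y :: t) ++ [x]) = pvFm (y :: t) := pvFm_append_of_lt x y t hx
      have hfj' : pvFm (x :: y :: t) = pvFm (y :: t) + 1 := pvFm_cons_cons_of_lt x y t hx
      have hjlt : pvFm (y :: t) < (y :: t).length := pvFm_lt_length y t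
      have hL1 : L1.length = (y :: t).length := by simp at hlen; simpa using hlen.symm
      have h1 : ¬(((y :: t) ++ [x]).length = 1) := by simp
      have h2 : ¬((x :: y :: t).length = 1) := by simp
      rw [loopA_rot ((y :: t) ++ [x]) (L1 ++ [l0]) loc ans hlen' (by simp)]
      rw [if_neg h1, if_neg h2, hfj, hfj']
      rw [List.getD_cons_succ, List.getD_append _ _ _ _ (by omega)]
      by_cases hl : L1.getD (pvFm (y :: t)) 0 = loc
      · rw [if_pos hl, if_pos hl]
      · rw [if_neg hl, if_neg hl]
        rw [pvRot_append _ _ _ (by omega), pvRot_append _ _ _ (by omega)]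
termination_by pvFm Q
decreasing_by
  rw [pvFm_append_of_lt x y t (by omega), pvFm_cons_cons_of_lt x y t (by omega)]
  omega

-- one unfolding of B's loop, phrased with pvFm / pvRot
theorem loopB_step (x : Int) (t lab : List Int) (loc count : Int) :
    solutionAltLoop (x :: t) lab loc count =
      if lab.getD (pvFm (x :: t)) 0 = loc then count + 1
      else solutionAltLoop (pvRot (pvFm (x :: t)) (x :: t)) (pvRot (pvFm (x :: t)) lab)
        loc (count + 1) := by
  have hcast : ((pvFm (x :: t) : Int) + 1) = ((pvFm (x :: t) + 1 : Nat) : Int) := by push_cast; ring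
  rw [solutionAltLoop]
  simp only [pvIdxMax_eq_pvFm, hcast,
    PySem.List.slice_from_natCast, PySem.List.slice_to_natCast]
  rfl

-- the two loops agree on every (parallel) state
theorem loopAB (Q L : List Int) (loc ans : Int) (hlen : Q.length = L.length) :
    solutionLoop Q L loc ans = solutionAltLoop Q L loc ans := by
  match Q with
  | [] => rw [solutionLoop, solutionAltLoop]
  | x :: t =>
    rw [loopB_step, loopA_rot _ _ _ _ hlen (by simp)]
    have hm := pvFm_lt_length x t
    by_cases h1 : (x :: t).length = 1
    · obtain rfl : t = [] := by
        cases t with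
        | nil => rfl
        | cons a b => simp at h1
      have hm0 : pvFm [x] = 0 := by
        rw [pvFm, pvMval_cons, List.foldl_nil, PySem.List.index?_cons_self]
        rfl
      rw [if_pos h1, hm0]
      by_cases hl : L.getD 0 0 = loc
      · rw [if_pos hl]
      · rw [if_neg hl]
        show ans + 1 = solutionAltLoop (pvRot 0 [x]) (pvRot 0 L) loc (ans + 1)
        have : pvRot 0 [x] = [] := by simp [pvRot]
        rw [this, solutionAltLoop]
    · rw [if_neg h1]
      by_cases hl : L.getD (pvFm (x :: t)) 0 = loc
      · rw [if_pos hl, if_pos hl]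
      · rw [if_neg hl, if_neg hl]
        exact loopAB (pvRot (pvFm (x :: t)) (x :: t)) (pvRot (pvFm (x :: t)) L) loc (ans + 1)
          (by rw [pvRot_length _ _ hm, pvRot_length _ L (by omega)]; omega)
termination_by Q.length
decreasing_by
  rw [pvRot_length _ _ hm]
  omega

-- ===== VERDICT (by name: the statement is the Claim_ definition above) =====
theorem solution_spec : Claim_equal_solution := by
  intro P loc _
  unfold Spec_solution solution solution_alt
  exact loopAB P _ loc 0 (by rw [PySem.List.length_pyRange_one, PySem.List.len_eq]; omega)
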